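-- pv_equiv track=rewrite | github.com/helljav/InteligenciaArtificial | Practica5/15Puzzle.py | determinaPos
-- ===== SOURCE A (Python) =====
-- def determinaPos(origen):
--     posF = 0
--     posC = 0
--     for fila in range(0,len(origen)):
--         for columna in range(0,len(origen[fila])):
--             if origen[fila][columna] == 0 :
--                 posF = fila
--                 posC = columna
--     return posF,posC
-- ===== SOURCE B (Python) =====
-- def determinaPos(origen):
--     for fila in reversed(range(len(origen))):
--         row = origen[fila]
--         for columna in reversed(range(len(row))):
--             if row[columna] == 0:
--                 return fila, columna
--     return 0, 0
-- ===== Notes on version B (the rewrite author's own statement) =====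
-- stated objective: alternative
-- what changed: Replaces A's full scan that overwrites an accumulator at every zero with a reverse row-major traversal that returns immediately at the first zero it meets (the last in row-major order), keeping the (0,0) default when no zero exists.
import Mathlib
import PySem

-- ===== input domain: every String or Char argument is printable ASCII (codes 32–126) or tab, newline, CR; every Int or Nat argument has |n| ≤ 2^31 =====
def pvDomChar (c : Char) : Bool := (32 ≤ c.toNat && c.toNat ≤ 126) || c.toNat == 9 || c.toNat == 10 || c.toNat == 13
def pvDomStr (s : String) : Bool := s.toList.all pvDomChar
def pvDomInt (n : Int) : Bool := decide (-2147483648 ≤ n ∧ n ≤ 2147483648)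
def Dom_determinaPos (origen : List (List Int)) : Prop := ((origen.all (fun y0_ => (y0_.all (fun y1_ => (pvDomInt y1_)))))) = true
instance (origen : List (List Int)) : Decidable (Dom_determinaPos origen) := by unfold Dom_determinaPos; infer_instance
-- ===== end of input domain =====

-- B scans the grid in reverse row-major order and returns at the first zero (alternative decomposition, same result).

-- ===== PORT A =====
-- A: full scan, overwriting (posF, posC) at every cell equal to 0; the index loops become folds over enumerated rows/cells.
def determinaPos (origen : List (List Int)) : Int × Int :=
  (PySem.List.enumerate origen 0).foldl
    (fun acc fr =>
      (PySem.List.enumerate fr.2 0).foldl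
        (fun a cv => if cv.2 == 0 then (fr.1, cv.1) else a) acc)
    (0, 0)

-- ===== PORT B =====
-- inner reversed column loop: first zero in the (already reversed) enumerated row
def altRowFind : List (Int × Int) → Option Int
  | [] => none
  | (j, v) :: rest => if v == 0 then some j else altRowFind rest

-- outer reversed row loop: return (fila, columna) at the first row with a zero, else (0, 0)
def altRowsFind : List (Int × List Int) → Int × Int
  | [] => (0, 0)
  | (i, row) :: rest =>
    match altRowFind (PySem.List.enumerate row 0).reverse with
    | some j => (i, j)
    | none => altRowsFind rest

def determinaPos_alt (origen : List (List Int)) : Int × Int :=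
  altRowsFind (PySem.List.enumerate origen 0).reverse

-- ===== PRECONDITION & SPEC =====
def Spec_determinaPos (origen : List (List Int)) (out : Int × Int) : Prop := out = determinaPos_alt origen
instance (origen : List (List Int)) (out : Int × Int) : Decidable (Spec_determinaPos origen out) := by unfold Spec_determinaPos; infer_instance

-- ===== CLAIM (what is proved, stated in full; the proofs are below) =====
def Claim_equal_determinaPos : Prop := ∀ (origen : List (List Int)), Dom_determinaPos origen → Spec_determinaPos origen (determinaPos origen)

-- ===== LEMMAS AND PROOFS =====

-- option-valued version of B's outer loop, for stating the loop invariant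
def optRowsFind : List (Int × List Int) → Option (Int × Int)
  | [] => none
  | (i, row) :: rest =>
    match altRowFind (PySem.List.enumerate row 0).reverse with
    | some j => some (i, j)
    | none => optRowsFind rest

theorem altRowsFind_eq_opt (r : List (Int × List Int)) :
    altRowsFind r = (optRowsFind r).getD (0, 0) := by
  induction r with
  | nil => rfl
  | cons hd tl ih =>
    obtain ⟨i, row⟩ := hd
    simp only [altRowsFind, optRowsFind]
    cases altRowFind (PySem.List.enumerate row 0).reverse <;> simp [ih]

-- inner loop: A's overwrite-fold over a cell list equals the first zero of the reversed list
theorem inner_fold (r : List (Int × Int)) (i : Int) (acc : Int × Int) :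
    r.reverse.foldl (fun a cv => if cv.2 == 0 then (i, cv.1) else a) acc
      = match altRowFind r with
        | some j => (i, j)
        | none => acc := by
  induction r generalizing acc with
  | nil => rfl
  | cons hd tl ih =>
    obtain ⟨j, v⟩ := hd
    simp only [List.reverse_cons, List.foldl_append, List.foldl_cons, List.foldl_nil, altRowFind]
    by_cases h : v == 0
    · simp [h]
    · rw [if_neg (by simpa using h), if_neg h]; exact ih acc

theorem inner_fold' (l : List (Int × Int)) (i : Int) (acc : Int × Int) :
    l.foldl (fun a cv => if cv.2 == 0 then (i, cv.1) else a) acc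
      = match altRowFind l.reverse with
        | some j => (i, j)
        | none => acc := by
  have := inner_fold l.reverse i acc
  simpa using this

-- outer loop invariant
theorem outer_fold (r : List (Int × List Int)) (acc : Int × Int) :
    r.reverse.foldl
        (fun acc fr =>
          (PySem.List.enumerate fr.2 0).foldl
            (fun a cv => if cv.2 == 0 then (fr.1, cv.1) else a) acc)
        acc
      = match optRowsFind r with
        | some p => p
        | none => acc := by
  induction r generalizing acc with
  | nil => rfl
  | cons hd tl ih =>
    obtain ⟨i, row⟩ := hd
    simp only [List.reverse_cons, List.foldl_append, List.foldl_cons, List.foldl_nil, optRowsFind]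
    rw [inner_fold']
    cases h : altRowFind (PySem.List.enumerate row 0).reverse with
    | some j => simp [h]
    | none => simp only [h]; exact ih acc

-- ===== VERDICT (by name: the statement is the Claim_ definition above) =====
theorem determinaPos_spec : Claim_equal_determinaPos := by
  intro origen _
  unfold Spec_determinaPos determinaPos determinaPos_alt
  have h := outer_fold (PySem.List.enumerate origen 0).reverse ((0 : Int), (0 : Int))
  rw [altRowsFind_eq_opt]
  simp only [List.reverse_reverse] at h
  rw [h]
  cases optRowsFind (PySem.List.enumerate origen 0).reverse <;> rfl
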